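-- pv_equiv track=rewrite | github.com/jithinsankar/benchmark | build/lib/benchmark/sys_info.py | _classify_device_category
-- ===== SOURCE A (Python) =====
-- from typing import Dict, Any, Optional
--
-- def _classify_device_category(system_info: Dict[str, Any]) -> str:
--     """Classify the device into categories for benchmarking grouping."""
--     manufacturer = system_info.get("manufacturer", "").lower()
--     model = system_info.get("model", "").lower()
--
--     # Apple devices
--     if "apple" in manufacturer or "mac" in model:
--         if "macbook" in model:
--             if "pro" in model:
--                 return "MacBook Pro"
--             elif "air" in model:
--                 return "MacBook Air"
--             else:
--                 return "MacBook"
--         elif "imac" in model: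
--             if "pro" in model:
--                 return "iMac Pro"
--             else:
--                 return "iMac"
--         elif "mac" in model:
--             if "pro" in model:
--                 return "Mac Pro"
--             elif "mini" in model:
--                 return "Mac Mini"
--             elif "studio" in model:
--                 return "Mac Studio"
--         return "Apple Device"
--
--     # Common laptop/desktop patterns
--     laptop_indicators = ["laptop", "notebook", "portable", "book", "zenbook",
--                         "thinkpad", "inspiron", "pavilion", "envy", "spectre",
--                         "xps", "surface", "yoga", "flex"]
--
--     desktop_indicators = ["desktop", "tower", "workstation", "optiplex",
--                          "precision", "vostro", "alienware"]
--
--     model_lower = model.lower()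
--
--     # Check for specific laptop series
--     if any(indicator in model_lower for indicator in laptop_indicators):
--         if "zenbook" in model_lower:
--             return "ASUS ZenBook"
--         elif "thinkpad" in model_lower:
--             return "Lenovo ThinkPad"
--         elif "xps" in model_lower:
--             return "Dell XPS"
--         elif "surface" in model_lower:
--             return "Microsoft Surface"
--         elif "pavilion" in model_lower:
--             return "HP Pavilion"
--         elif "envy" in model_lower:
--             return "HP Envy"
--         elif "spectre" in model_lower:
--             return "HP Spectre"
--         elif "inspiron" in model_lower:
--             return "Dell Inspiron"
--         elif "yoga" in model_lower:
--             return "Lenovo Yoga"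
--         else:
--             return f"{manufacturer.title()} Laptop"
--
--     # Check for desktop patterns
--     elif any(indicator in model_lower for indicator in desktop_indicators):
--         return f"{manufacturer.title()} Desktop"
--
--     # Manufacturer-based classification
--     elif "asus" in manufacturer:
--         return "ASUS Computer"
--     elif "dell" in manufacturer:
--         return "Dell Computer"
--     elif "hp" in manufacturer or "hewlett" in manufacturer:
--         return "HP Computer"
--     elif "lenovo" in manufacturer:
--         return "Lenovo Computer"
--     elif "microsoft" in manufacturer:
--         return "Microsoft Device"
--     elif "acer" in manufacturer:
--         return "Acer Computer"
--     elif "msi" in manufacturer: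
--         return "MSI Computer"
--
--     return "Generic Computer"
-- ===== SOURCE B (Python) =====
-- # Collect-and-select rewrite: instead of walking the staged if/elif cascades with
-- # short-circuit first-match, B eagerly evaluates every rule condition once, collects
-- # ALL matching (priority, label) candidates from one flat priority table, and selects
-- # the minimum-priority candidate.  The nesting/staging of A is dissolved into
-- # conjunctive flat conditions plus numeric priorities.
--
-- def _classify_device_category(system_info):
--     manufacturer = system_info.get("manufacturer", "").lower()
--     model = system_info.get("model", "").lower()
--     apple = "apple" in manufacturer or "mac" in model
--     laptop_any = any(k in model for k in (
--         "laptop", "notebook", "portable", "book", "zenbook", "thinkpad",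
--         "inspiron", "pavilion", "envy", "spectre", "xps", "surface", "yoga", "flex"))
--     desktop_any = any(k in model for k in (
--         "desktop", "tower", "workstation", "optiplex", "precision", "vostro", "alienware"))
--     rules = [
--         (apple and "macbook" in model and "pro" in model, "MacBook Pro"),
--         (apple and "macbook" in model and "air" in model, "MacBook Air"),
--         (apple and "macbook" in model, "MacBook"),
--         (apple and "imac" in model and "pro" in model, "iMac Pro"),
--         (apple and "imac" in model, "iMac"),
--         (apple and "mac" in model and "pro" in model, "Mac Pro"),
--         (apple and "mac" in model and "mini" in model, "Mac Mini"),
--         (apple and "mac" in model and "studio" in model, "Mac Studio"),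
--         (apple, "Apple Device"),
--         ("zenbook" in model, "ASUS ZenBook"),
--         ("thinkpad" in model, "Lenovo ThinkPad"),
--         ("xps" in model, "Dell XPS"),
--         ("surface" in model, "Microsoft Surface"),
--         ("pavilion" in model, "HP Pavilion"),
--         ("envy" in model, "HP Envy"),
--         ("spectre" in model, "HP Spectre"),
--         ("inspiron" in model, "Dell Inspiron"),
--         ("yoga" in model, "Lenovo Yoga"),
--         (laptop_any, manufacturer.title() + " Laptop"),
--         (desktop_any, manufacturer.title() + " Desktop"),
--         ("asus" in manufacturer, "ASUS Computer"),
--         ("dell" in manufacturer, "Dell Computer"),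
--         ("hp" in manufacturer or "hewlett" in manufacturer, "HP Computer"),
--         ("lenovo" in manufacturer, "Lenovo Computer"),
--         ("microsoft" in manufacturer, "Microsoft Device"),
--         ("acer" in manufacturer, "Acer Computer"),
--         ("msi" in manufacturer, "MSI Computer"),
--         (True, "Generic Computer"),
--     ]
--     candidates = [(i, label) for i, (cond, label) in enumerate(rules) if cond]
--     return min(candidates, key=lambda c: c[0])[1]
-- ===== Notes on version B (the rewrite author's own statement) =====
-- stated objective: alternative
-- what changed: The staged short-circuit if/elif cascades are replaced by a collect-and-select scheme: every rule condition of one flat priority table is evaluated eagerly, all matching (priority,label) candidates are collected, and the minimum-priority candidate is returned.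
import Mathlib
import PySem

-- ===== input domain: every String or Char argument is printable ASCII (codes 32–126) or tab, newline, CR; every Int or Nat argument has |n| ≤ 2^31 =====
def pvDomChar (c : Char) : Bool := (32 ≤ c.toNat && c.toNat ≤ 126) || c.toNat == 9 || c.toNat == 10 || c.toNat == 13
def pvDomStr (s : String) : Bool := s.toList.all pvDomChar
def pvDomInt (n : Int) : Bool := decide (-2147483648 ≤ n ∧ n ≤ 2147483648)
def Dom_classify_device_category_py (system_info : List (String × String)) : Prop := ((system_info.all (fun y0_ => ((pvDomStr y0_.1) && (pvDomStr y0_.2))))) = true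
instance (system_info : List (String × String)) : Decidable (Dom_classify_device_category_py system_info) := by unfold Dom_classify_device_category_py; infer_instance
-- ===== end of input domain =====

-- B replaces the staged short-circuit cascades by a flat priority table whose matching
-- (priority, label) candidates are all collected and the minimum-priority one selected.

-- hand port of Python's str.title() (exact on ASCII: cased = isalpha there);
-- shared by both ports, since PySem has no title primitive.
def pyTitleGo : List Char → Bool → List Char
  | [], _ => []
  | c :: cs, prev =>
    if PySem.Chars.isalpha c then
      (if prev then PySem.Chars.lowerChar c else PySem.Chars.upperChar c) :: pyTitleGo cs true
    else
      c :: pyTitleGo cs false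

def pyTitle (s : String) : String := String.ofList (pyTitleGo s.toList false)

-- ===== PORT A =====
def classify_device_category_py (system_info : List (String × String)) : String :=
  let d := PySem.Dict.mk system_info
  let manufacturer := PySem.Str.lower (d.getD "manufacturer" "")
  let model := PySem.Str.lower (d.getD "model" "")
  if PySem.Str.isIn "apple" manufacturer || PySem.Str.isIn "mac" model then
    if PySem.Str.isIn "macbook" model then
      if PySem.Str.isIn "pro" model then "MacBook Pro"
      else if PySem.Str.isIn "air" model then "MacBook Air"
      else "MacBook"
    else if PySem.Str.isIn "imac" model then
      if PySem.Str.isIn "pro" model then "iMac Pro"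
      else "iMac"
    else if PySem.Str.isIn "mac" model then
      if PySem.Str.isIn "pro" model then "Mac Pro"
      else if PySem.Str.isIn "mini" model then "Mac Mini"
      else if PySem.Str.isIn "studio" model then "Mac Studio"
      else "Apple Device"
    else "Apple Device"
  else
    let laptop_indicators := ["laptop", "notebook", "portable", "book", "zenbook",
                              "thinkpad", "inspiron", "pavilion", "envy", "spectre",
                              "xps", "surface", "yoga", "flex"]
    let desktop_indicators := ["desktop", "tower", "workstation", "optiplex",
                               "precision", "vostro", "alienware"]
    let model_lower := PySem.Str.lower model
    if laptop_indicators.any (fun ind => PySem.Str.isIn ind model_lower) then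
      if PySem.Str.isIn "zenbook" model_lower then "ASUS ZenBook"
      else if PySem.Str.isIn "thinkpad" model_lower then "Lenovo ThinkPad"
      else if PySem.Str.isIn "xps" model_lower then "Dell XPS"
      else if PySem.Str.isIn "surface" model_lower then "Microsoft Surface"
      else if PySem.Str.isIn "pavilion" model_lower then "HP Pavilion"
      else if PySem.Str.isIn "envy" model_lower then "HP Envy"
      else if PySem.Str.isIn "spectre" model_lower then "HP Spectre"
      else if PySem.Str.isIn "inspiron" model_lower then "Dell Inspiron"
      else if PySem.Str.isIn "yoga" model_lower then "Lenovo Yoga"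
      else pyTitle manufacturer ++ " Laptop"
    else if desktop_indicators.any (fun ind => PySem.Str.isIn ind model_lower) then
      pyTitle manufacturer ++ " Desktop"
    else if PySem.Str.isIn "asus" manufacturer then "ASUS Computer"
    else if PySem.Str.isIn "dell" manufacturer then "Dell Computer"
    else if PySem.Str.isIn "hp" manufacturer || PySem.Str.isIn "hewlett" manufacturer then "HP Computer"
    else if PySem.Str.isIn "lenovo" manufacturer then "Lenovo Computer"
    else if PySem.Str.isIn "microsoft" manufacturer then "Microsoft Device"
    else if PySem.Str.isIn "acer" manufacturer then "Acer Computer"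
    else if PySem.Str.isIn "msi" manufacturer then "MSI Computer"
    else "Generic Computer"

-- ===== PORT B =====
-- Source B's flat priority table (the local `rules`, lifted to a named helper)
def pvRules (manufacturer model : String) : List (Bool × String) :=
  let apple := PySem.Str.isIn "apple" manufacturer || PySem.Str.isIn "mac" model
  let laptop_any := (["laptop", "notebook", "portable", "book", "zenbook", "thinkpad",
                      "inspiron", "pavilion", "envy", "spectre", "xps", "surface", "yoga",
                      "flex"] : List String).any (fun k => PySem.Str.isIn k model)
  let desktop_any := (["desktop", "tower", "workstation", "optiplex", "precision",
                       "vostro", "alienware"] : List String).any (fun k => PySem.Str.isIn k model)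
  [(apple && PySem.Str.isIn "macbook" model && PySem.Str.isIn "pro" model, "MacBook Pro"),
   (apple && PySem.Str.isIn "macbook" model && PySem.Str.isIn "air" model, "MacBook Air"),
   (apple && PySem.Str.isIn "macbook" model, "MacBook"),
   (apple && PySem.Str.isIn "imac" model && PySem.Str.isIn "pro" model, "iMac Pro"),
   (apple && PySem.Str.isIn "imac" model, "iMac"),
   (apple && PySem.Str.isIn "mac" model && PySem.Str.isIn "pro" model, "Mac Pro"),
   (apple && PySem.Str.isIn "mac" model && PySem.Str.isIn "mini" model, "Mac Mini"),
   (apple && PySem.Str.isIn "mac" model && PySem.Str.isIn "studio" model, "Mac Studio"),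
   (apple, "Apple Device"),
   (PySem.Str.isIn "zenbook" model, "ASUS ZenBook"),
   (PySem.Str.isIn "thinkpad" model, "Lenovo ThinkPad"),
   (PySem.Str.isIn "xps" model, "Dell XPS"),
   (PySem.Str.isIn "surface" model, "Microsoft Surface"),
   (PySem.Str.isIn "pavilion" model, "HP Pavilion"),
   (PySem.Str.isIn "envy" model, "HP Envy"),
   (PySem.Str.isIn "spectre" model, "HP Spectre"),
   (PySem.Str.isIn "inspiron" model, "Dell Inspiron"),
   (PySem.Str.isIn "yoga" model, "Lenovo Yoga"),
   (laptop_any, pyTitle manufacturer ++ " Laptop"),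
   (desktop_any, pyTitle manufacturer ++ " Desktop"),
   (PySem.Str.isIn "asus" manufacturer, "ASUS Computer"),
   (PySem.Str.isIn "dell" manufacturer, "Dell Computer"),
   (PySem.Str.isIn "hp" manufacturer || PySem.Str.isIn "hewlett" manufacturer, "HP Computer"),
   (PySem.Str.isIn "lenovo" manufacturer, "Lenovo Computer"),
   (PySem.Str.isIn "microsoft" manufacturer, "Microsoft Device"),
   (PySem.Str.isIn "acer" manufacturer, "Acer Computer"),
   (PySem.Str.isIn "msi" manufacturer, "MSI Computer"),
   (true, "Generic Computer")]

-- Source B's candidate comprehension `[(i, label) for i, (cond, label) in enumerate(rules) if cond]`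
-- ported as an index-accumulating recursion (exact: same pairs in the same order)
def pvCollect (i : Int) : List (Bool × String) → List (Int × String)
  | [] => []
  | r :: rs => if r.1 then (i, r.2) :: pvCollect (i + 1) rs else pvCollect (i + 1) rs

def classify_device_category_py_alt (system_info : List (String × String)) : String :=
  let d := PySem.Dict.mk system_info
  let manufacturer := PySem.Str.lower (d.getD "manufacturer" "")
  let model := PySem.Str.lower (d.getD "model" "")
  let candidates := pvCollect 0 (pvRules manufacturer model)
  -- min(candidates, key=lambda c: c[0])[1]; the none branch is where Python's min raises
  -- ValueError (unreachable here: the last rule is always-true)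
  match PySem.List.min? candidates (fun c => c.1) with
  | some p => p.2
  | none => ""

-- ===== PRECONDITION & SPEC =====
def Spec_classify_device_category_py (system_info : List (String × String)) (out : String) : Prop := out = classify_device_category_py_alt system_info
instance (system_info : List (String × String)) (out : String) : Decidable (Spec_classify_device_category_py system_info out) := by unfold Spec_classify_device_category_py; infer_instance

-- ===== CLAIM (what is proved, stated in full; the proofs are below) =====
def Claim_equal_classify_device_category_py : Prop := ∀ (system_info : List (String × String)), Dom_classify_device_category_py system_info → Spec_classify_device_category_py system_info (classify_device_category_py system_info)

-- ===== LEMMAS AND PROOFS =====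
theorem lowerChar_idem (c : Char) : PySem.Chars.lowerChar (PySem.Chars.lowerChar c) = PySem.Chars.lowerChar c := by
  unfold PySem.Chars.lowerChar PySem.Chars.isupper
  split_ifs with h1 h2 <;> try rfl
  exfalso
  simp only [Bool.and_eq_true, decide_eq_true_eq, Char.le_def, UInt32.le_iff_toNat_le] at h1 h2
  have e1 : c.toNat = c.val.toNat := rfl
  have e2 : 'A'.val.toNat = 65 := rfl
  have e3 : 'Z'.val.toNat = 90 := rfl
  have e4 : (Char.ofNat (c.toNat + 32)).toNat = (Char.ofNat (c.toNat + 32)).val.toNat := rfl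
  have hv : (c.toNat + 32).isValidChar := by
    left; change c.toNat + 32 < 55296
    have := h1.2; omega
  have heq : (Char.ofNat (c.toNat + 32)).toNat = c.toNat + 32 := by
    rw [Char.toNat_ofNat]; simp [hv]
  omega

theorem str_lower_idem (s : String) : PySem.Str.lower (PySem.Str.lower s) = PySem.Str.lower s := by
  have h : PySem.Chars.lowerChar ∘ PySem.Chars.lowerChar = PySem.Chars.lowerChar := funext lowerChar_idem
  simp [PySem.Str.lower, PySem.Chars.lower, List.map_map, h]

-- the cascade-shaped reading of the priority table: label of the first true rule
def pvFirst : List (Bool × String) → String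
  | [] => ""
  | r :: rs => if r.1 then r.2 else pvFirst rs

theorem pvCollect_lb (rs : List (Bool × String)) : ∀ (i : Int), ∀ q ∈ pvCollect i rs, i ≤ q.1 := by
  induction rs with
  | nil => intro i q hq; simp [pvCollect] at hq
  | cons r rs ih =>
    intro i q hq
    by_cases hc : r.1 = true <;> simp [pvCollect, hc] at hq
    · rcases hq with h | h
      · simp [h]
      · have := ih (i + 1) q h; omega
    · have := ih (i + 1) q hq; omega

theorem min?_head (x : Int × String) (xs : List (Int × String))
    (h : ∀ q ∈ xs, x.1 < q.1) :
    PySem.List.min? (x :: xs) (fun c => c.1) = some x := by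
  cases hmin : PySem.List.min? (x :: xs) (fun c => c.1) with
  | none =>
    rw [PySem.List.min?_eq_none_iff] at hmin
    cases hmin
  | some m =>
    have hm := PySem.List.min?_mem hmin
    have hle := PySem.List.min?_isMin hmin x (List.mem_cons_self)
    rcases List.mem_cons.mp hm with rfl | hmem
    · rfl
    · have := h m hmem
      simp at hle
      omega

theorem pvCollect_first (rs : List (Bool × String)) : ∀ (i : Int),
    (match PySem.List.min? (pvCollect i rs) (fun c => c.1) with
     | some p => p.2
     | none => "") = pvFirst rs := by
  induction rs with
  | nil =>
    intro i
    have : PySem.List.min? (pvCollect i ([] : List (Bool × String))) (fun c => c.1) = none := by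
      rw [PySem.List.min?_eq_none_iff]; rfl
    simp [this, pvFirst]
  | cons r rs ih =>
    intro i
    by_cases hc : r.1 = true
    · have hmin : PySem.List.min? (pvCollect i (r :: rs)) (fun c => c.1) = some (i, r.2) := by
        simp only [pvCollect, hc, if_true]
        exact min?_head _ _ (fun q hq => by have := pvCollect_lb rs (i + 1) q hq; omega)
      simp [hmin, pvFirst, hc]
    · simp only [pvCollect, hc, if_false, pvFirst, Bool.false_eq_true]
      exact ih (i + 1)

set_option maxHeartbeats 2000000 in
theorem cascade_apple_eq (man mo : String)
    (h : (PySem.Str.isIn "apple" man || PySem.Str.isIn "mac" mo) = true) :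
    (if PySem.Str.isIn "macbook" mo then
        if PySem.Str.isIn "pro" mo then "MacBook Pro"
        else if PySem.Str.isIn "air" mo then "MacBook Air"
        else "MacBook"
      else if PySem.Str.isIn "imac" mo then
        if PySem.Str.isIn "pro" mo then "iMac Pro"
        else "iMac"
      else if PySem.Str.isIn "mac" mo then
        if PySem.Str.isIn "pro" mo then "Mac Pro"
        else if PySem.Str.isIn "mini" mo then "Mac Mini"
        else if PySem.Str.isIn "studio" mo then "Mac Studio"
        else "Apple Device"
      else "Apple Device") = pvFirst (pvRules man mo) := by
  simp only [pvRules, pvFirst, h, Bool.true_and, if_true]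
  generalize PySem.Str.isIn "macbook" mo = mb
  generalize PySem.Str.isIn "pro" mo = pro
  generalize PySem.Str.isIn "air" mo = air
  generalize PySem.Str.isIn "imac" mo = im
  generalize PySem.Str.isIn "mac" mo = mc
  generalize PySem.Str.isIn "mini" mo = mn
  generalize PySem.Str.isIn "studio" mo = st
  revert mb pro air im mc mn st
  decide

set_option maxHeartbeats 2000000 in
theorem cascade_nonapple_eq (man mo : String)
    (h : (PySem.Str.isIn "apple" man || PySem.Str.isIn "mac" mo) = false) :
    (if (["laptop", "notebook", "portable", "book", "zenbook",
           "thinkpad", "inspiron", "pavilion", "envy", "spectre",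
           "xps", "surface", "yoga", "flex"] : List String).any
            (fun ind => PySem.Str.isIn ind mo) then
        if PySem.Str.isIn "zenbook" mo then "ASUS ZenBook"
        else if PySem.Str.isIn "thinkpad" mo then "Lenovo ThinkPad"
        else if PySem.Str.isIn "xps" mo then "Dell XPS"
        else if PySem.Str.isIn "surface" mo then "Microsoft Surface"
        else if PySem.Str.isIn "pavilion" mo then "HP Pavilion"
        else if PySem.Str.isIn "envy" mo then "HP Envy"
        else if PySem.Str.isIn "spectre" mo then "HP Spectre"
        else if PySem.Str.isIn "inspiron" mo then "Dell Inspiron"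
        else if PySem.Str.isIn "yoga" mo then "Lenovo Yoga"
        else pyTitle man ++ " Laptop"
      else if (["desktop", "tower", "workstation", "optiplex",
                "precision", "vostro", "alienware"] : List String).any
                 (fun ind => PySem.Str.isIn ind mo) then
        pyTitle man ++ " Desktop"
      else if PySem.Str.isIn "asus" man then "ASUS Computer"
      else if PySem.Str.isIn "dell" man then "Dell Computer"
      else if PySem.Str.isIn "hp" man || PySem.Str.isIn "hewlett" man then "HP Computer"
      else if PySem.Str.isIn "lenovo" man then "Lenovo Computer"
      else if PySem.Str.isIn "microsoft" man then "Microsoft Device"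
      else if PySem.Str.isIn "acer" man then "Acer Computer"
      else if PySem.Str.isIn "msi" man then "MSI Computer"
      else "Generic Computer") = pvFirst (pvRules man mo) := by
  simp only [pvRules, h, Bool.false_and]
  simp only [pvFirst, Bool.false_eq_true, if_false, if_true]
  simp only [List.any_cons, List.any_nil, Bool.or_false, Bool.or_eq_true]
  by_cases hl : (PySem.Str.isIn "laptop" mo = true ∨ PySem.Str.isIn "notebook" mo = true ∨
      PySem.Str.isIn "portable" mo = true ∨ PySem.Str.isIn "book" mo = true ∨
      PySem.Str.isIn "zenbook" mo = true ∨ PySem.Str.isIn "thinkpad" mo = true ∨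
      PySem.Str.isIn "inspiron" mo = true ∨ PySem.Str.isIn "pavilion" mo = true ∨
      PySem.Str.isIn "envy" mo = true ∨ PySem.Str.isIn "spectre" mo = true ∨
      PySem.Str.isIn "xps" mo = true ∨ PySem.Str.isIn "surface" mo = true ∨
      PySem.Str.isIn "yoga" mo = true ∨ PySem.Str.isIn "flex" mo = true)
  · rw [if_pos hl, if_pos hl]
  · simp only [not_or, Bool.not_eq_true] at hl
    obtain ⟨e1, e2, e3, e4, e5, e6, e7, e8, e9, e10, e11, e12, e13, e14⟩ := hl
    simp only [e1, e2, e3, e4, e5, e6, e7, e8, e9, e10, e11, e12, e13, e14,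
      Bool.false_eq_true, if_false, or_false]

-- ===== VERDICT (by name: the statement is the Claim_ definition above) =====
theorem classify_device_category_py_spec : Claim_equal_classify_device_category_py := by
  intro si _
  unfold Spec_classify_device_category_py classify_device_category_py classify_device_category_py_alt
  show (if _ then _ else _) =
    (match PySem.List.min? (pvCollect 0 (pvRules _ _)) (fun c => c.1) with
     | some p => p.2
     | none => "")
  rw [str_lower_idem, pvCollect_first]
  by_cases h : (PySem.Str.isIn "apple" (PySem.Str.lower ((PySem.Dict.mk si).getD "manufacturer" "")) ||
      PySem.Str.isIn "mac" (PySem.Str.lower ((PySem.Dict.mk si).getD "model" ""))) = true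
  · rw [if_pos h]
    exact cascade_apple_eq _ _ h
  · rw [if_neg h]
    exact cascade_nonapple_eq _ _ (by simpa using h)
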